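-- pv_equiv track=rewrite | github.com/lokeshdangii/How-To-Solve-It-By-Computer | Array Techniques/Algo 4.3 Finding the maximum number in a set/4.3.2.py | maxNumCount
-- ===== SOURCE A (Python) =====
-- def maxNumCount(arr):
--     max = arr[0]
--     count = 1
--     for i in range(1, len(arr)):
--         if arr[i] > max:
--             max = arr[i]
--             count = 1
--         elif arr[i] == max:
--             count += 1
--     return count
-- ===== SOURCE B (Python) =====
-- def maxNumCount(arr):
--     m = arr[0]
--     for x in arr:
--         if x > m:
--             m = x
--     count = 0
--     for x in arr:
--         if x == m:
--             count += 1
--     return count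
-- ===== Notes on version B (the rewrite author's own statement) =====
-- stated objective: simpler
-- what changed: Replaces A's single fused index loop with coupled (max, count) state by two independent whole-list scans: one computing the maximum, one counting elements equal to it.
-- outside the precondition, e.g. on maxNumCount([]): A raises IndexError, B raises IndexError
import Mathlib
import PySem

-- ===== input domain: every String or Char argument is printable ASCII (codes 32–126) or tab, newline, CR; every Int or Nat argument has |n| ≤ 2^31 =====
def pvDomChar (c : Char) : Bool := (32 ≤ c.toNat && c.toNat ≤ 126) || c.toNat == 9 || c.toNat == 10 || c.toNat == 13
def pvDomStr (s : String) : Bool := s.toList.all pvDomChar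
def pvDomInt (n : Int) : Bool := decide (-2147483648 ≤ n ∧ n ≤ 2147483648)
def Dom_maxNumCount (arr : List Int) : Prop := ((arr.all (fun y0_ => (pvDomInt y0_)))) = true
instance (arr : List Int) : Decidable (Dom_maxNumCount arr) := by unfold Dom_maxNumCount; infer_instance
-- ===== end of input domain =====

-- B replaces A's fused single pass with two independent scans (max, then count); objective: simpler.
-- Pre_ excludes the empty list, on which A raises IndexError (arr[0]); B raises the same there.


-- ===== PORT A =====
def maxNumCount (arr : List Int) : Int :=
  let m := PySem.List.pyGetD arr 0 0
  ((PySem.List.pyRange 1 (arr.length : Int) 1).foldl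
    (fun (st : Int × Int) i =>
      let x := PySem.List.pyGetD arr i 0
      if x > st.1 then (x, 1) else if x = st.1 then (st.1, st.2 + 1) else st)
    (m, 1)).2

-- ===== PORT B =====
def maxNumCount_alt (arr : List Int) : Int :=
  match arr with
  | [] => 0   -- unreachable under Pre_ (Python raises IndexError)
  | h :: _ =>
    let m := arr.foldl (fun a x => if x > a then x else a) h
    arr.foldl (fun c x => if x = m then c + 1 else c) 0

-- ===== PRECONDITION & SPEC =====
-- Pre_ excludes exactly the empty list, where A raises IndexError.
def Pre_maxNumCount (arr : List Int) : Prop := arr ≠ []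
instance (arr : List Int) : Decidable (Pre_maxNumCount arr) := by unfold Pre_maxNumCount; infer_instance
def pvWitness_maxNumCount : List Int := [3, 1, 3]

def Spec_maxNumCount (arr : List Int) (out : Int) : Prop := out = maxNumCount_alt arr
instance (arr : List Int) (out : Int) : Decidable (Spec_maxNumCount arr out) := by unfold Spec_maxNumCount; infer_instance

-- ===== CLAIM (what is proved, stated in full; the proofs are below) =====
def Claim_equal_maxNumCount : Prop := ∀ (arr : List Int), Dom_maxNumCount arr → Pre_maxNumCount arr → Spec_maxNumCount arr (maxNumCount arr)

-- ===== LEMMAS AND PROOFS =====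

-- counting fold shifts its accumulator
theorem cnt_shift (xs : List Int) (m c : Int) :
    xs.foldl (fun c x => if x = m then c + 1 else c) c
      = c + xs.foldl (fun c x => if x = m then c + 1 else c) 0 := by
  induction xs generalizing c with
  | nil => simp
  | cons x xs ih =>
      simp only [List.foldl_cons]
      rw [ih, ih (if x = m then (0:Int) + 1 else 0)]
      split_ifs <;> ring

-- the running maximum never decreases below its seed
theorem max_ge (xs : List Int) (m : Int) :
    m ≤ xs.foldl (fun a x => if x > a then x else a) m := by
  induction xs generalizing m with
  | nil => simp
  | cons x xs ih =>
      simp only [List.foldl_cons]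
      split_ifs with h
      · exact le_trans (le_of_lt h) (ih x)
      · exact ih m

-- A's fused state in terms of B's two folds
theorem fused_eq (xs : List Int) (m c : Int) :
    xs.foldl
      (fun (st : Int × Int) x =>
        if x > st.1 then (x, 1) else if x = st.1 then (st.1, st.2 + 1) else st)
      (m, c)
    = (xs.foldl (fun a x => if x > a then x else a) m,
       (if xs.foldl (fun a x => if x > a then x else a) m = m then c else 0)
         + xs.foldl (fun c x => if x = xs.foldl (fun a x => if x > a then x else a) m then c + 1 else c) 0) := by
  induction xs generalizing m c with
  | nil => simp
  | cons x xs ih =>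
      simp only [List.foldl_cons]
      by_cases h1 : x > m
      · simp only [if_pos h1]
        rw [ih x 1]
        conv_rhs => rw [cnt_shift]
        have hM := max_ge xs x
        simp only [Prod.mk.injEq]
        refine ⟨by trivial, ?_⟩
        split_ifs <;> omega
      · by_cases h2 : x = m
        · subst h2
          simp only [if_neg h1, if_true]
          rw [ih x (c + 1)]
          conv_rhs => rw [cnt_shift]
          simp only [Prod.mk.injEq]
          refine ⟨by trivial, ?_⟩
          split_ifs <;> omega
        · simp only [if_neg h1, if_neg h2]
          rw [ih m c]
          conv_rhs => rw [cnt_shift]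
          have hM := max_ge xs m
          simp only [Prod.mk.injEq]
          refine ⟨by trivial, ?_⟩
          split_ifs <;> omega

-- ===== VERDICT (by name: the statement is the Claim_ definition above) =====
theorem maxNumCount_spec : Claim_equal_maxNumCount := by
  intro arr _ hpre
  unfold Spec_maxNumCount maxNumCount maxNumCount_alt
  match arr, hpre with
  | h :: t, _ =>
    simp only []
    rw [PySem.List.foldl_pyRange_pyGetD' (h :: t) 0
      (fun (st : Int × Int) x =>
        if x > st.1 then (x, 1) else if x = st.1 then (st.1, st.2 + 1) else st)
      (PySem.List.pyGetD (h :: t) 0 0, 1) (a := 1) (by norm_num)]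
    rw [PySem.List.pyGetD_zero_cons]
    show (t.foldl _ (h, 1)).2 = _
    rw [fused_eq t h 1]
    simp only [List.foldl_cons, ite_self]
    conv_rhs => rw [cnt_shift]
    split_ifs <;> omega
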